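-- pv_equiv track=rewrite | github.com/jmcdonough98/aoc | 2019/day12/day12.py | stepCoord
-- ===== SOURCE A (Python) =====
-- def stepCoord(state):
--     for j in range(4):
--         for k in range(j+1,4):
--             if state[j] < state[k]:
--                 state[j + 4] += 1
--                 state[k + 4] -= 1
--             elif state[j] > state[k]:
--                 state[j + 4] -= 1
--                 state[k + 4] += 1
--     for j in range(4):
--         state[j] += state[j+4]
--     return state
-- ===== SOURCE B (Python) =====
-- def _sgn(p, q):
--     return (q > p) - (q < p)
--
-- def stepCoord(state):
--     p0, p1, p2, p3 = state[:4]
--     v0, v1, v2, v3 = state[4:8]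
--     pos = (p0, p1, p2, p3)
--     newvel = [v + sum(_sgn(p, q) for q in pos) for p, v in zip(pos, (v0, v1, v2, v3))]
--     newpos = [p + v for p, v in zip(pos, newvel)]
--     return newpos + newvel + state[8:]
-- ===== Notes on version B (the rewrite author's own statement) =====
-- stated objective: simpler
-- what changed: Replaces the triangular pairwise loop that mutates two velocities per pair with a per-moon pass summing sign(q-p) over all four moons, built functionally (no mutation) from unpacked position/velocity slices.
import Mathlib
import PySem

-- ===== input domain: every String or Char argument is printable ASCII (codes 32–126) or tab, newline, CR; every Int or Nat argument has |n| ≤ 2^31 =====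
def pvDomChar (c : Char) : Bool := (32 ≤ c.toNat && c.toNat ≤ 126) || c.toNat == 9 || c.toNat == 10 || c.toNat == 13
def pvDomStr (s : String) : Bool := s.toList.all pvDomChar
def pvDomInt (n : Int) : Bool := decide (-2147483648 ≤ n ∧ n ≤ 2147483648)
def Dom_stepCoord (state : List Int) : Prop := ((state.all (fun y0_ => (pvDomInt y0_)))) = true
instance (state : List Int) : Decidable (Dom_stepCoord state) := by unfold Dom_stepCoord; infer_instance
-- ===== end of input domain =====

-- B replaces A's triangular pairwise gravity loop (mutating two velocities per pair) by a
-- per-moon sign-sum pass built functionally from slices; equivalence is about the RETURN value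
-- only (A mutates its argument in place, B does not).

-- ===== PORT A =====
-- the body of A's inner pair loop, named (pyGetD/pySetD are exact under Pre_, length ≥ 8)
def pairUpd (s : List Int) (j k : Int) : List Int :=
  if PySem.List.pyGetD s j 0 < PySem.List.pyGetD s k 0 then
    let s' := PySem.List.pySetD s (j + 4) (PySem.List.pyGetD s (j + 4) 0 + 1)
    PySem.List.pySetD s' (k + 4) (PySem.List.pyGetD s' (k + 4) 0 - 1)
  else if PySem.List.pyGetD s k 0 < PySem.List.pyGetD s j 0 then
    let s' := PySem.List.pySetD s (j + 4) (PySem.List.pyGetD s (j + 4) 0 - 1)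
    PySem.List.pySetD s' (k + 4) (PySem.List.pyGetD s' (k + 4) 0 + 1)
  else s

-- the body of A's position loop: state[j] += state[j+4]
def posUpd (s : List Int) (j : Int) : List Int :=
  PySem.List.pySetD s j (PySem.List.pyGetD s j 0 + PySem.List.pyGetD s (j + 4) 0)

def stepCoord (state : List Int) : List Int :=
  let s1 := (PySem.List.pyRange 0 4 1).foldl (fun s j =>
    (PySem.List.pyRange (j + 1) 4 1).foldl (fun s k => pairUpd s j k) s) state
  (PySem.List.pyRange 0 4 1).foldl (fun s j => posUpd s j) s1

-- ===== PORT B =====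
-- (q > p) - (q < p) from Source B's _sgn helper
def pvSgn (p q : Int) : Int := (if p < q then 1 else 0) - (if q < p then 1 else 0)

def stepCoord_alt (state : List Int) : List Int :=
  match PySem.List.slice state none (some 4), PySem.List.slice state (some 4) (some 8) with
  | [p0, p1, p2, p3], [v0, v1, v2, v3] =>
    let pos := [p0, p1, p2, p3]
    let newvel := (pos.zip [v0, v1, v2, v3]).map (fun pv => pv.2 + (pos.map (fun q => pvSgn pv.1 q)).sum)
    let newpos := (pos.zip newvel).map (fun pv => pv.1 + pv.2)
    newpos ++ newvel ++ PySem.List.slice state (some 8) none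
  | _, _ => []  -- unreachable under Pre_ (Python's unpacking raises ValueError here)

-- ===== PRECONDITION & SPEC =====
-- A indexes state[0..7]: it raises IndexError on any list of fewer than 8 elements.
def Pre_stepCoord (state : List Int) : Prop := 8 ≤ state.length
instance (state : List Int) : Decidable (Pre_stepCoord state) := by unfold Pre_stepCoord; infer_instance
def pvWitness_stepCoord : List Int := [3, -1, 4, 0, 1, 0, -2, 5]

def Spec_stepCoord (state : List Int) (out : List Int) : Prop := out = stepCoord_alt state
instance (state : List Int) (out : List Int) : Decidable (Spec_stepCoord state out) := by unfold Spec_stepCoord; infer_instance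

-- ===== CLAIM (what is proved, stated in full; the proofs are below) =====
def Claim_equal_stepCoord : Prop := ∀ (state : List Int), Dom_stepCoord state → Pre_stepCoord state → Spec_stepCoord state (stepCoord state)

-- ===== LEMMAS AND PROOFS =====

theorem pairUpd01 (a b c d e f g h : Int) (r : List Int) :
    pairUpd (a::b::c::d::e::f::g::h::r) 0 1
      = a::b::c::d::(e + pvSgn a b)::(f + pvSgn b a)::g::h::r := by
  unfold pairUpd
  norm_num [PySem.List.pyGetD_ofNat', PySem.List.pySetD_of_nonneg,
    List.getD, List.set, List.getElem?_cons_succ, List.getElem?_cons_zero, Int.toNat]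
  split_ifs <;> simp_all [pvSgn] <;> omega

theorem pairUpd02 (a b c d e f g h : Int) (r : List Int) :
    pairUpd (a::b::c::d::e::f::g::h::r) 0 2
      = a::b::c::d::(e + pvSgn a c)::f::(g + pvSgn c a)::h::r := by
  unfold pairUpd
  norm_num [PySem.List.pyGetD_ofNat', PySem.List.pySetD_of_nonneg,
    List.getD, List.set, List.getElem?_cons_succ, List.getElem?_cons_zero, Int.toNat]
  split_ifs <;> simp_all [pvSgn] <;> omega

theorem pairUpd03 (a b c d e f g h : Int) (r : List Int) :
    pairUpd (a::b::c::d::e::f::g::h::r) 0 3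
      = a::b::c::d::(e + pvSgn a d)::f::g::(h + pvSgn d a)::r := by
  unfold pairUpd
  norm_num [PySem.List.pyGetD_ofNat', PySem.List.pySetD_of_nonneg,
    List.getD, List.set, List.getElem?_cons_succ, List.getElem?_cons_zero, Int.toNat]
  split_ifs <;> simp_all [pvSgn] <;> omega

theorem pairUpd12 (a b c d e f g h : Int) (r : List Int) :
    pairUpd (a::b::c::d::e::f::g::h::r) 1 2
      = a::b::c::d::e::(f + pvSgn b c)::(g + pvSgn c b)::h::r := by
  unfold pairUpd
  norm_num [PySem.List.pyGetD_ofNat', PySem.List.pySetD_of_nonneg,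
    List.getD, List.set, List.getElem?_cons_succ, List.getElem?_cons_zero, Int.toNat]
  split_ifs <;> simp_all [pvSgn] <;> omega

theorem pairUpd13 (a b c d e f g h : Int) (r : List Int) :
    pairUpd (a::b::c::d::e::f::g::h::r) 1 3
      = a::b::c::d::e::(f + pvSgn b d)::g::(h + pvSgn d b)::r := by
  unfold pairUpd
  norm_num [PySem.List.pyGetD_ofNat', PySem.List.pySetD_of_nonneg,
    List.getD, List.set, List.getElem?_cons_succ, List.getElem?_cons_zero, Int.toNat]
  split_ifs <;> simp_all [pvSgn] <;> omega

theorem pairUpd23 (a b c d e f g h : Int) (r : List Int) :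
    pairUpd (a::b::c::d::e::f::g::h::r) 2 3
      = a::b::c::d::e::f::(g + pvSgn c d)::(h + pvSgn d c)::r := by
  unfold pairUpd
  norm_num [PySem.List.pyGetD_ofNat', PySem.List.pySetD_of_nonneg,
    List.getD, List.set, List.getElem?_cons_succ, List.getElem?_cons_zero, Int.toNat]
  split_ifs <;> simp_all [pvSgn] <;> omega

theorem posUpd0 (a b c d e f g h : Int) (r : List Int) :
    posUpd (a::b::c::d::e::f::g::h::r) 0 = (a + e)::b::c::d::e::f::g::h::r := by
  unfold posUpd
  norm_num [PySem.List.pyGetD_ofNat', PySem.List.pySetD_of_nonneg,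
    List.getD, List.set, List.getElem?_cons_succ, List.getElem?_cons_zero, Int.toNat]

theorem posUpd1 (a b c d e f g h : Int) (r : List Int) :
    posUpd (a::b::c::d::e::f::g::h::r) 1 = a::(b + f)::c::d::e::f::g::h::r := by
  unfold posUpd
  norm_num [PySem.List.pyGetD_ofNat', PySem.List.pySetD_of_nonneg,
    List.getD, List.set, List.getElem?_cons_succ, List.getElem?_cons_zero, Int.toNat]

theorem posUpd2 (a b c d e f g h : Int) (r : List Int) :
    posUpd (a::b::c::d::e::f::g::h::r) 2 = a::b::(c + g)::d::e::f::g::h::r := by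
  unfold posUpd
  norm_num [PySem.List.pyGetD_ofNat', PySem.List.pySetD_of_nonneg,
    List.getD, List.set, List.getElem?_cons_succ, List.getElem?_cons_zero, Int.toNat]

theorem posUpd3 (a b c d e f g h : Int) (r : List Int) :
    posUpd (a::b::c::d::e::f::g::h::r) 3 = a::b::c::(d + h)::e::f::g::h::r := by
  unfold posUpd
  norm_num [PySem.List.pyGetD_ofNat', PySem.List.pySetD_of_nonneg,
    List.getD, List.set, List.getElem?_cons_succ, List.getElem?_cons_zero, Int.toNat]

theorem pvSgn_self (a : Int) : pvSgn a a = 0 := by simp [pvSgn]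

-- ===== VERDICT (by name: the statement is the Claim_ definition above) =====
theorem stepCoord_spec : Claim_equal_stepCoord := by
  intro state _ hPre
  unfold Spec_stepCoord
  match state, hPre with
  | a :: b :: c :: d :: e :: f :: g :: h :: rest, _ =>
    simp only [stepCoord, stepCoord_alt,
      show PySem.List.pyRange 0 4 1 = [0, 1, 2, 3] from rfl,
      show PySem.List.pyRange (0 + 1) 4 1 = [1, 2, 3] from rfl,
      show PySem.List.pyRange (1 + 1) 4 1 = [2, 3] from rfl,
      show PySem.List.pyRange (2 + 1) 4 1 = [3] from rfl,
      show PySem.List.pyRange (3 + 1) 4 1 = [] from rfl,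
      List.foldl_cons, List.foldl_nil]
    simp only [pairUpd01, pairUpd02, pairUpd03, pairUpd12, pairUpd13, pairUpd23,
      posUpd0, posUpd1, posUpd2, posUpd3]
    rw [PySem.List.slice_to _ (by norm_num), PySem.List.slice_toNat _ (by norm_num) (by norm_num),
      PySem.List.slice_from _ (by norm_num)]
    norm_num [show (4:Int).toNat = 4 from rfl, show (8:Int).toNat = 8 from rfl,
      List.take, List.drop, List.zip, List.zipWith, List.map, List.sum, pvSgn_self,
      List.cons.injEq]
    and_intros <;> ring
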